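-- pv_equiv track=rewrite | github.com/TadejMohorcic/advent-of-code | 2023/2023-14.py | rearange_array
-- ===== SOURCE A (Python) =====
-- def rearange_array(array_slice):
--     i = 1
--     while i < len(array_slice):
--         j = i
--
--         while j > 0 and array_slice[j - 1] < array_slice[j] and array_slice[j] != 2:
--             current = array_slice[j]
--             array_slice[j] = array_slice[j - 1]
--             array_slice[j - 1] = current
--             j -= 1
--
--         i += 1
--
--     return array_slice
-- ===== SOURCE B (Python) =====
-- def rearange_array(array_slice):
--     # One partition pass + sorts: values > 2 float to the front (descending),
--     # the rest keeps its cube-rocks (2) in place with each segment between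
--     # them sorted descending.  O(n log n) instead of A's O(n^2) insertion sort.
--     bigs = []
--     rest = []
--     for x in array_slice:
--         if x > 2:
--             bigs.append(x)
--         else:
--             rest.append(x)
--     bigs.sort(reverse=True)
--     out = bigs
--     seg = []
--     for x in rest:
--         if x == 2:
--             seg.sort(reverse=True)
--             out += seg
--             out.append(2)
--             seg = []
--         else:
--             seg.append(x)
--     seg.sort(reverse=True)
--     out += seg
--     return out
-- ===== Notes on version B (the rewrite author's own statement) =====
-- stated objective: faster
-- what changed: Replaces A's O(n^2) in-place barrier-aware insertion sort by one partition pass plus O(n log n) sorts: values > 2 are sorted descending up front, and each run between 2-barriers in the remainder is sorted descending in place.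
import Mathlib
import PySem

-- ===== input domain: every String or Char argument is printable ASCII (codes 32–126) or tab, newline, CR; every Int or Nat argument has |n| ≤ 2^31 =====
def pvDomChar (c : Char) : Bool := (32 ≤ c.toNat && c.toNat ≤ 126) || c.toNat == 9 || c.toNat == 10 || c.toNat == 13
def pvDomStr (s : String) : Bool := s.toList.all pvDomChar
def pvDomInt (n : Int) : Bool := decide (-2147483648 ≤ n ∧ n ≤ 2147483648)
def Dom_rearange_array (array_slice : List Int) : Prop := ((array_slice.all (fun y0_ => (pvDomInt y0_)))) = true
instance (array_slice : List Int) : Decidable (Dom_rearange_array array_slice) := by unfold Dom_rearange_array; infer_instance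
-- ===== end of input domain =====

-- B replaces A's quadratic barrier-aware insertion sort by one partition pass plus sorts
-- (values > 2 sorted descending up front, each run between 2-barriers sorted descending).
-- A mutates its argument in place and returns it; the equivalence proved here is about the
-- RETURN value only (B builds a fresh list).

-- ===== PORT A =====
-- inner while loop: bubble the element at index j leftwards
def pvBubble : List Int → Nat → List Int
  | arr, 0 => arr
  | arr, j + 1 =>
    if arr.getD j 0 < arr.getD (j + 1) 0 ∧ arr.getD (j + 1) 0 ≠ 2 then
      pvBubble ((arr.set (j + 1) (arr.getD j 0)).set j (arr.getD (j + 1) 0)) j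
    else arr

-- needed by pvOuter's termination argument
theorem pvBubble_length : ∀ (j : Nat) (arr : List Int), (pvBubble arr j).length = arr.length := by
  intro j
  induction j with
  | zero => intro arr; rfl
  | succ j ih =>
    intro arr
    simp only [pvBubble]
    split
    · rw [ih]; simp
    · rfl

-- outer while loop over i
def pvOuter (arr : List Int) (i : Nat) : List Int :=
  if i < arr.length then pvOuter (pvBubble arr i) (i + 1) else arr
termination_by arr.length - i
decreasing_by rw [pvBubble_length]; omega

def rearange_array (array_slice : List Int) : List Int := pvOuter array_slice 1

-- ===== PORT B =====
def pvSortDesc (t : List Int) : List Int := PySem.List.sorted t (fun y => y) true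

-- body of B's first loop (partition into >2 and the rest)
def pvPartStep (p : List Int × List Int) (x : Int) : List Int × List Int :=
  if 2 < x then (p.1 ++ [x], p.2) else (p.1, p.2 ++ [x])

-- body of B's second loop (close a segment at each 2, else extend it)
def pvSegStep (s : List Int × List Int) (x : Int) : List Int × List Int :=
  if x = 2 then (s.1 ++ pvSortDesc s.2 ++ [2], []) else (s.1, s.2 ++ [x])

def rearange_array_alt (array_slice : List Int) : List Int :=
  let p := array_slice.foldl pvPartStep ([], [])
  let q := p.2.foldl pvSegStep (pvSortDesc p.1, [])
  q.1 ++ pvSortDesc q.2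

-- ===== PRECONDITION & SPEC =====
def Spec_rearange_array (array_slice : List Int) (out : List Int) : Prop := out = rearange_array_alt array_slice
instance (array_slice : List Int) (out : List Int) : Decidable (Spec_rearange_array array_slice out) := by unfold Spec_rearange_array; infer_instance

-- ===== CLAIM (what is proved, stated in full; the proofs are below) =====
def Claim_equal_rearange_array : Prop := ∀ (array_slice : List Int), Dom_rearange_array array_slice → Spec_rearange_array array_slice (rearange_array array_slice)

-- ===== LEMMAS AND PROOFS =====

-- A common functional model: insert each element from the right, bubbling it
-- leftwards past strictly smaller elements unless it equals 2.
def pvIns (x : Int) : List Int → List Int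
  | [] => [x]
  | y :: ys => if y < x ∧ x ≠ 2 then y :: pvIns x ys else x :: y :: ys

def pvStep (st : List Int) (x : Int) : List Int := (pvIns x st.reverse).reverse

def pvModel (arr : List Int) : List Int := arr.foldl pvStep []

theorem pvIns_length (x : Int) : ∀ (u : List Int), (pvIns x u).length = u.length + 1 := by
  intro u
  induction u with
  | nil => rfl
  | cons y ys ih => simp only [pvIns]; split <;> simp [ih]

theorem mem_pvIns (x z : Int) : ∀ (u : List Int), z ∈ pvIns x u ↔ z = x ∨ z ∈ u := by
  intro u
  induction u with
  | nil => simp [pvIns]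
  | cons y ys ih => simp only [pvIns]; split <;> simp [ih] <;> tauto

theorem pvIns_perm (x : Int) : ∀ (u : List Int), (pvIns x u).Perm (x :: u) := by
  intro u
  induction u with
  | nil => simp [pvIns]
  | cons y ys ih =>
    simp only [pvIns]
    split
    · exact ((ih.cons y).trans (List.Perm.swap x y ys))
    · exact List.Perm.refl _

theorem pvIns_pairwise (x : Int) (hx : x ≠ 2) :
    ∀ (u : List Int), u.Pairwise (· ≤ ·) → (pvIns x u).Pairwise (· ≤ ·) := by
  intro u
  induction u with
  | nil => intro _; simp [pvIns]
  | cons y ys ih =>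
    intro hu
    rw [List.pairwise_cons] at hu
    simp only [pvIns]
    split
    · rename_i h
      rw [List.pairwise_cons]
      refine ⟨?_, ih hu.2⟩
      intro z hz
      rcases (mem_pvIns x z ys).mp hz with rfl | hz
      · exact le_of_lt h.1
      · exact hu.1 z hz
    · rename_i h
      have hxy : x ≤ y := by
        rcases lt_or_ge y x with h1 | h1
        · exact absurd ⟨h1, hx⟩ h
        · exact h1
      rw [List.pairwise_cons]
      refine ⟨?_, List.pairwise_cons.mpr hu⟩
      intro z hz
      rcases List.mem_cons.mp hz with rfl | hz
      · exact hxy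
      · exact le_trans hxy (hu.1 z hz)

theorem pvIns_append_pass (x : Int) (hx : x ≠ 2) :
    ∀ (p q : List Int), (∀ y ∈ p, y < x) → pvIns x (p ++ q) = p ++ pvIns x q := by
  intro p
  induction p with
  | nil => intro q _; rfl
  | cons y p' ih =>
    intro q h
    simp only [List.cons_append, pvIns]
    rw [if_pos ⟨h y (List.mem_cons_self), hx⟩, ih q (fun z hz => h z (List.mem_cons_of_mem y hz))]

theorem pvIns_append_stop (x : Int) :
    ∀ (p q : List Int), (∀ y, q.head? = some y → ¬(y < x ∧ x ≠ 2)) →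
      pvIns x (p ++ q) = pvIns x p ++ q := by
  intro p
  induction p with
  | nil =>
    intro q h
    cases q with
    | nil => rfl
    | cons y q' =>
      simp only [List.nil_append, pvIns]
      rw [if_neg (h y rfl)]
      rfl
  | cons z p' ih =>
    intro q h
    simp only [List.cons_append, pvIns]
    split
    · rw [ih q h]; rfl
    · rfl

theorem pvIns_two : ∀ (u : List Int), pvIns 2 u = 2 :: u := by
  intro u
  cases u with
  | nil => rfl
  | cons y ys => simp [pvIns]

-- inserting into the reversed descending sort = descending sort of the snoc
theorem pvIns_sortDesc (t : List Int) (x : Int) (hx : x ≠ 2) :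
    (pvIns x (pvSortDesc t).reverse).reverse = pvSortDesc (t ++ [x]) := by
  have hrev : ((pvSortDesc (t ++ [x])).reverse).Pairwise (· ≤ ·) := by
    rw [List.pairwise_reverse]
    exact PySem.List.sorted_pairwise_rev (t ++ [x]) (fun y => y)
  have hu : ((pvSortDesc t).reverse).Pairwise (· ≤ ·) := by
    rw [List.pairwise_reverse]
    exact PySem.List.sorted_pairwise_rev t (fun y => y)
  have hsorted : (pvIns x (pvSortDesc t).reverse).Pairwise (· ≤ ·) := pvIns_pairwise x hx _ hu
  have hperm : (pvIns x (pvSortDesc t).reverse).Perm ((pvSortDesc (t ++ [x])).reverse) := by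
    refine ((pvIns_perm x _).trans ?_)
    have h1 : ((pvSortDesc t).reverse).Perm t :=
      (List.reverse_perm _).trans (PySem.List.sorted_perm t (fun y => y) true)
    have h2 : ((pvSortDesc (t ++ [x])).reverse).Perm (t ++ [x]) :=
      (List.reverse_perm _).trans (PySem.List.sorted_perm (t ++ [x]) (fun y => y) true)
    refine ((h1.cons x).trans ?_).trans h2.symm
    exact (List.perm_append_singleton x t).symm
  have := List.eq_of_perm_of_sorted (le := (· ≤ ·))
    (fun a b _ _ h1 h2 => le_antisymm h1 h2) hsorted hrev hperm
  rw [this, List.reverse_reverse]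

-- ===== A-side characterisation =====
theorem pvBubble_append : ∀ (j : Nat) (l r : List Int), j < l.length →
    pvBubble (l ++ r) j = pvBubble l j ++ r := by
  intro j
  induction j with
  | zero => intro l r _; rfl
  | succ j ih =>
    intro l r h
    have hj : j < l.length := Nat.lt_of_succ_lt h
    simp only [pvBubble]
    rw [List.getD_append _ _ _ j hj, List.getD_append _ _ _ (j + 1) h]
    split
    · rw [List.set_append, if_pos h, List.set_append,
        if_pos (by simpa using hj)]
      exact ih _ r (by simpa using hj)
    · rfl

theorem pvBubble_snoc : ∀ (st : List Int) (x : Int),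
    pvBubble (st ++ [x]) st.length = (pvIns x st.reverse).reverse := by
  intro st
  induction st using List.reverseRecOn with
  | nil => intro x; rfl
  | append_singleton s y ih =>
    intro x
    have harr : (s ++ [y]) ++ [x] = s ++ [y, x] := by simp
    have hlen : (s ++ [y]).length = s.length + 1 := by simp
    rw [harr, hlen]
    simp only [pvBubble]
    rw [List.getD_append_right _ _ _ s.length (le_refl _),
        List.getD_append_right _ _ _ (s.length + 1) (by omega)]
    simp only [Nat.sub_self, Nat.add_sub_cancel_left]
    have hy : ([y, x] : List Int).getD 0 0 = y := rfl
    have hx' : ([y, x] : List Int).getD 1 0 = x := by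
      have : s.length + 1 - s.length = 1 := by omega
      rfl
    rw [hy, hx']
    split
    · rename_i hcond
      have hset : ((s ++ [y, x]).set (s.length + 1) y).set s.length x = (s ++ [x]) ++ [y] := by
        rw [List.set_append, if_neg (by omega)]
        have h1 : s.length + 1 - s.length = 1 := by omega
        rw [h1]
        have h2 : ([y, x] : List Int).set 1 y = [y, y] := rfl
        rw [h2, List.set_append, if_neg (by omega), Nat.sub_self]
        have h3 : ([y, y] : List Int).set 0 x = [x, y] := rfl
        rw [h3]
        simp
      rw [hset, pvBubble_append s.length (s ++ [x]) [y] (by simp), ih x]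
      have : (s ++ [y]).reverse = y :: s.reverse := by simp
      rw [this]
      simp only [pvIns]
      rw [if_pos hcond]
      simp
    · rename_i hcond
      have : (s ++ [y]).reverse = y :: s.reverse := by simp
      rw [this]
      simp only [pvIns]
      rw [if_neg hcond]
      simp

theorem pvOuter_foldl : ∀ (rest st : List Int),
    pvOuter (st ++ rest) st.length = rest.foldl pvStep st := by
  intro rest
  induction rest with
  | nil =>
    intro st
    rw [pvOuter]
    simp
  | cons x r ih =>
    intro st
    rw [pvOuter, if_pos (by simp)]
    have h1 : st ++ x :: r = (st ++ [x]) ++ r := by simp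
    rw [h1, pvBubble_append st.length (st ++ [x]) r (by simp), pvBubble_snoc st x]
    have h2 : st.length + 1 = (pvStep st x).length := by
      simp [pvStep, pvIns_length]
    rw [h2]
    exact ih (pvStep st x)

theorem A_eq_model : ∀ (arr : List Int), rearange_array arr = pvModel arr := by
  intro arr
  cases arr with
  | nil => unfold rearange_array pvModel; rw [pvOuter]; simp
  | cons x xs =>
    show pvOuter (x :: xs) 1 = pvModel (x :: xs)
    have h1 : (x :: xs : List Int) = [x] ++ xs := rfl
    have h2 : (1 : Nat) = ([x] : List Int).length := rfl
    rw [h1, h2, pvOuter_foldl xs [x]]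
    rfl

-- ===== B-side characterisation =====
theorem pvSeg_init : ∀ (r a b s : List Int),
    r.foldl pvSegStep (a ++ b, s) =
      (a ++ (r.foldl pvSegStep (b, s)).1, (r.foldl pvSegStep (b, s)).2) := by
  intro r
  induction r with
  | nil => intro a b s; rfl
  | cons x r' ih =>
    intro a b s
    simp only [List.foldl, pvSegStep]
    split
    · have := ih a (b ++ pvSortDesc s ++ [2]) []
      simpa [List.append_assoc] using this
    · exact ih a b (s ++ [x])

theorem pvPart_inv : ∀ (l a b : List Int), (∀ y ∈ a, 2 < y) → (∀ y ∈ b, ¬ 2 < y) →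
    (∀ y ∈ (l.foldl pvPartStep (a, b)).1, 2 < y) ∧ (∀ y ∈ (l.foldl pvPartStep (a, b)).2, ¬ 2 < y) := by
  intro l
  induction l with
  | nil => intro a b ha hb; exact ⟨ha, hb⟩
  | cons x l' ih =>
    intro a b ha hb
    simp only [List.foldl, pvPartStep]
    split
    · rename_i h
      refine ih _ _ (fun y hy => ?_) hb
      rcases List.mem_append.mp hy with hy | hy
      · exact ha y hy
      · simp at hy; omega
    · rename_i h
      refine ih _ _ ha (fun y hy => ?_)
      rcases List.mem_append.mp hy with hy | hy
      · exact hb y hy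
      · simp at hy; omega

theorem pvSeg_inv : ∀ (r : List Int), (∀ y ∈ r, ¬ 2 < y) → ∀ (c s : List Int),
    (∀ y ∈ c, y ≤ 2) → (c = [] ∨ ∃ c', c = c' ++ [2]) → (∀ y ∈ s, y < 2) →
    (∀ y ∈ (r.foldl pvSegStep (c, s)).1, y ≤ 2) ∧
    ((r.foldl pvSegStep (c, s)).1 = [] ∨ ∃ c', (r.foldl pvSegStep (c, s)).1 = c' ++ [2]) ∧
    (∀ y ∈ (r.foldl pvSegStep (c, s)).2, y < 2) := by
  intro r
  induction r with
  | nil => intro _ c s hc hc2 hs; exact ⟨hc, hc2, hs⟩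
  | cons x r' ih =>
    intro hr c s hc hc2 hs
    have hx : ¬ 2 < x := hr x (List.mem_cons_self)
    have hr' : ∀ y ∈ r', ¬ 2 < y := fun y hy => hr y (List.mem_cons_of_mem x hy)
    simp only [List.foldl, pvSegStep]
    split
    · refine ih hr' _ _ (fun y hy => ?_) (Or.inr ⟨c ++ pvSortDesc s, by simp⟩) (by simp)
      rcases List.mem_append.mp hy with hy | hy
      · rcases List.mem_append.mp hy with hy | hy
        · exact hc y hy
        · exact le_of_lt (hs y ((PySem.List.mem_sorted s (fun y => y) true y).mp hy))
      · simp at hy; omega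
    · rename_i hx2
      refine ih hr' _ _ hc hc2 (fun y hy => ?_)
      rcases List.mem_append.mp hy with hy | hy
      · exact hs y hy
      · simp at hy; omega

theorem sortDesc_nil : pvSortDesc [] = [] := rfl

theorem step_char (B C O : List Int) (x : Int)
    (hB : ∀ y ∈ B, 2 < y) (hC : ∀ y ∈ C, y ≤ 2)
    (hC2 : C = [] ∨ ∃ c', C = c' ++ [2]) (hO : ∀ y ∈ O, y < 2) :
    pvStep ((pvSortDesc B ++ C) ++ pvSortDesc O) x =
      if 2 < x then (pvSortDesc (B ++ [x]) ++ C) ++ pvSortDesc O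
      else if x = 2 then ((pvSortDesc B ++ C) ++ pvSortDesc O) ++ [2]
      else (pvSortDesc B ++ C) ++ pvSortDesc (O ++ [x]) := by
  have hBmem : ∀ y ∈ pvSortDesc B, 2 < y :=
    fun y hy => hB y ((PySem.List.mem_sorted B (fun y => y) true y).mp hy)
  have hOmem : ∀ y ∈ pvSortDesc O, y < 2 :=
    fun y hy => hO y ((PySem.List.mem_sorted O (fun y => y) true y).mp hy)
  unfold pvStep
  by_cases h2 : 2 < x
  · -- x > 2 : it bubbles past everything ≤ 2 into the descending bigs prefix
    rw [if_pos h2]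
    have hrev : ((pvSortDesc B ++ C) ++ pvSortDesc O).reverse
        = ((pvSortDesc O).reverse ++ C.reverse) ++ (pvSortDesc B).reverse := by simp
    have hpass : ∀ y ∈ (pvSortDesc O).reverse ++ C.reverse, y < x := by
      intro y hy
      rcases List.mem_append.mp hy with hy | hy
      · have := hOmem y (List.mem_reverse.mp hy); omega
      · have := hC y (List.mem_reverse.mp hy); omega
    have hins : pvIns x (pvSortDesc B).reverse = (pvSortDesc (B ++ [x])).reverse := by
      rw [← pvIns_sortDesc B x (by omega), List.reverse_reverse]
    rw [hrev, pvIns_append_pass x (by omega) _ _ hpass, hins]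
    simp
  · rw [if_neg h2]
    by_cases hx2 : x = 2
    · -- x = 2 : appended at the end
      subst hx2
      rw [if_pos rfl, pvIns_two]
      simp
    · -- x < 2 : it stays inside the open segment (stopped by the closing 2 or a big)
      rw [if_neg hx2]
      have hrev : ((pvSortDesc B ++ C) ++ pvSortDesc O).reverse
          = (pvSortDesc O).reverse ++ (C.reverse ++ (pvSortDesc B).reverse) := by simp
      have hstop : ∀ y, (C.reverse ++ (pvSortDesc B).reverse).head? = some y →
          ¬(y < x ∧ x ≠ 2) := by
        intro y hy hcond
        rcases hC2 with hnil | ⟨c', hc'⟩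
        · subst hnil
          simp only [List.reverse_nil, List.nil_append] at hy
          have hyB : y ∈ pvSortDesc B := by
            cases hq : (pvSortDesc B).reverse with
            | nil => rw [hq] at hy; simp at hy
            | cons z q' =>
              rw [hq] at hy
              simp only [List.head?_cons, Option.some.injEq] at hy
              subst hy
              exact List.mem_reverse.mp (hq ▸ List.mem_cons_self)
          have := hBmem y hyB
          omega
        · subst hc'
          have hh : (((c' ++ [2]).reverse) ++ (pvSortDesc B).reverse).head? = some 2 := by simp
          rw [hh, Option.some.injEq] at hy
          subst hy
          omega
      have hins : pvIns x (pvSortDesc O).reverse = (pvSortDesc (O ++ [x])).reverse := by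
        rw [← pvIns_sortDesc O x hx2, List.reverse_reverse]
      rw [hrev, pvIns_append_stop x _ _ hstop, hins]
      simp

theorem B_snoc : ∀ (l : List Int) (x : Int),
    rearange_array_alt (l ++ [x]) = pvStep (rearange_array_alt l) x := by
  intro l x
  obtain ⟨hB, hR⟩ := pvPart_inv l [] [] (by simp) (by simp)
  obtain ⟨hC, hC2, hO⟩ :=
    pvSeg_inv ((l.foldl pvPartStep ([], [])).2) hR [] [] (by simp) (Or.inl rfl) (by simp)
  have hfacB : ∀ (B0 : List Int),
      ((l.foldl pvPartStep ([], [])).2).foldl pvSegStep (pvSortDesc B0, []) =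
        (pvSortDesc B0 ++ (((l.foldl pvPartStep ([], [])).2).foldl pvSegStep ([], [])).1,
         (((l.foldl pvPartStep ([], [])).2).foldl pvSegStep ([], [])).2) := by
    intro B0
    simpa using pvSeg_init ((l.foldl pvPartStep ([], [])).2) (pvSortDesc B0) [] []
  simp only [rearange_array_alt, List.foldl_append, List.foldl_cons, List.foldl_nil]
  by_cases h2 : 2 < x
  · rw [show pvPartStep (l.foldl pvPartStep ([], [])) x
        = ((l.foldl pvPartStep ([], [])).1 ++ [x], (l.foldl pvPartStep ([], [])).2)
      from by simp [pvPartStep, h2]]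
    rw [hfacB ((l.foldl pvPartStep ([], [])).1 ++ [x]), hfacB ((l.foldl pvPartStep ([], [])).1),
        step_char _ _ _ x hB hC hC2 hO, if_pos h2]
  · rw [show pvPartStep (l.foldl pvPartStep ([], [])) x
        = ((l.foldl pvPartStep ([], [])).1, (l.foldl pvPartStep ([], [])).2 ++ [x])
      from by simp [pvPartStep, h2]]
    rw [List.foldl_append, List.foldl_cons, List.foldl_nil,
        hfacB ((l.foldl pvPartStep ([], [])).1),
        step_char _ _ _ x hB hC hC2 hO, if_neg h2]
    by_cases hx2 : x = 2
    · subst hx2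
      rw [if_pos rfl]
      simp [pvSegStep, sortDesc_nil]
    · rw [if_neg hx2]
      simp [pvSegStep, hx2]

theorem B_eq_model : ∀ (l : List Int), rearange_array_alt l = pvModel l := by
  intro l
  induction l using List.reverseRecOn with
  | nil => rfl
  | append_singleton l x ih =>
    rw [B_snoc l x, ih]
    simp [pvModel, List.foldl_append]

-- ===== VERDICT (by name: the statement is the Claim_ definition above) =====
theorem rearange_array_spec : Claim_equal_rearange_array := by
  intro arr _
  unfold Spec_rearange_array
  rw [A_eq_model, B_eq_model]
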